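-- pv_equiv track=rewrite | github.com/zyg0326/kgdw-watermark | methods/enhanced_spacy_newton.py | _newton_eval
-- ===== SOURCE A (Python) =====
-- from typing import List, Dict, Tuple, Optional, Set
--
-- def _newton_eval(xs: List[int], coeffs: List[int], xq: int, mod: int) -> int:
--     n = len(coeffs)
--     if n == 0:
--         return 0
--     val = coeffs[-1]
--     for i in range(n-2, -1, -1):
--         val = (val * ((xq - xs[i]) % mod) + coeffs[i]) % mod
--     return val % mod
-- ===== SOURCE B (Python) =====
-- from typing import List
--
-- def _newton_eval(xs: List[int], coeffs: List[int], xq: int, mod: int) -> int: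
--     if not coeffs:
--         return 0
--     # stage 1: prefix products of the reduced linear factors
--     prods = []
--     p = 1
--     for x in xs[:len(coeffs) - 1]:
--         p = p * ((xq - x) % mod) % mod
--         prods.append(p)
--     # stage 2: sum coefficient * prefix-product, mod at each step
--     total = coeffs[0]
--     for c, q in zip(coeffs[1:], prods):
--         total = (total + c * q) % mod
--     return total % mod
-- ===== Notes on version B (the rewrite author's own statement) =====
-- stated objective: alternative
-- what changed: Replaces A's single backward Horner loop over descending indices with two staged forward passes: first a scan building the list of modular prefix products of the linear factors, then a zip-fold summing coefficient*prefix-product; no indexing and no nested-multiplication accumulator remain.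
import Mathlib
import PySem

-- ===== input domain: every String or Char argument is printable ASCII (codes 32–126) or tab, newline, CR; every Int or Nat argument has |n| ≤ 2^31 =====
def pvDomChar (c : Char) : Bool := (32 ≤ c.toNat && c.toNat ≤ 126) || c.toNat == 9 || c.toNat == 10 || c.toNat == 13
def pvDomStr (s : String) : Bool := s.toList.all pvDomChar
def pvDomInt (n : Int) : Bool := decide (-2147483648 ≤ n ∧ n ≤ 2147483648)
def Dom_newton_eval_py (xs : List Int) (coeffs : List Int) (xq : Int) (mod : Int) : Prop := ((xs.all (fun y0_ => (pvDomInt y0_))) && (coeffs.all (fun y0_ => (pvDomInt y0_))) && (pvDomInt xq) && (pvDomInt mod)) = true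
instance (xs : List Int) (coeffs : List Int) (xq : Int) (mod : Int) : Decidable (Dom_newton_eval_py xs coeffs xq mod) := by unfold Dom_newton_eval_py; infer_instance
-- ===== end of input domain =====

-- B replaces A's single backward Horner loop by two staged forward passes:
-- a scan building the list of modular prefix products, then a zip-fold summing
-- coefficient * prefix-product (alternative decomposition, same cost).


-- ===== PORT A =====
-- literal port of A: val = coeffs[-1]; for i in range(n-2,-1,-1): val = (val*((xq-xs[i])%mod)+coeffs[i])%mod; return val%mod
def newton_eval_py (xs : List Int) (coeffs : List Int) (xq : Int) (mod : Int) : Int :=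
  let n : Int := coeffs.length
  if n = 0 then 0
  else
    let val0 : Int := PySem.List.pyGetD coeffs (-1) 0
    let val : Int := (PySem.List.pyRange (n - 2) (-1) (-1)).foldl
      (fun val i =>
        PySem.Int.mod (val * (PySem.Int.mod (xq - PySem.List.pyGetD xs i 0) mod) + PySem.List.pyGetD coeffs i 0) mod)
      val0
    PySem.Int.mod val mod

-- ===== PORT B =====
-- literal port of B: stage 1 builds prods by appending p = p*((xq-x)%mod)%mod for x in xs[:len(coeffs)-1];
-- stage 2 folds total = (total + c*q)%mod over zip(coeffs[1:], prods); returns total%mod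
def newton_eval_py_alt (xs : List Int) (coeffs : List Int) (xq : Int) (mod : Int) : Int :=
  if coeffs = [] then 0
  else
    let prods : List Int := ((PySem.List.slice xs none (some ((coeffs.length : Int) - 1))).foldl
      (fun (st : List Int × Int) x =>
        let p := PySem.Int.mod (st.2 * PySem.Int.mod (xq - x) mod) mod
        (st.1 ++ [p], p)) ([], 1)).1
    let total : Int := ((PySem.List.slice coeffs (some 1) none).zip prods).foldl
      (fun total cq => PySem.Int.mod (total + cq.1 * cq.2) mod) (PySem.List.pyGetD coeffs 0 0)
    PySem.Int.mod total mod

-- ===== PRECONDITION & SPEC =====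
-- Pre_ excludes exactly the inputs on which Python A raises: mod = 0 (ZeroDivisionError in '% mod')
-- and xs shorter than len(coeffs)-1 (IndexError on xs[i]); when coeffs is empty A returns 0 before using either.
def Pre_newton_eval_py (xs : List Int) (coeffs : List Int) (xq : Int) (mod : Int) : Prop :=
  coeffs = [] ∨ (mod ≠ 0 ∧ (coeffs.length : Int) ≤ (xs.length : Int) + 1)
instance (xs : List Int) (coeffs : List Int) (xq : Int) (mod : Int) : Decidable (Pre_newton_eval_py xs coeffs xq mod) := by unfold Pre_newton_eval_py; infer_instance
def pvWitness_newton_eval_py : List Int × List Int × Int × Int := ([1, 2], [3, 4, 5], 7, 11)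

def Spec_newton_eval_py (xs : List Int) (coeffs : List Int) (xq : Int) (mod : Int) (out : Int) : Prop := out = newton_eval_py_alt xs coeffs xq mod
instance (xs : List Int) (coeffs : List Int) (xq : Int) (mod : Int) (out : Int) : Decidable (Spec_newton_eval_py xs coeffs xq mod out) := by unfold Spec_newton_eval_py; infer_instance

-- ===== CLAIM (what is proved, stated in full; the proofs are below) =====
def Claim_equal_newton_eval_py : Prop := ∀ (xs : List Int) (coeffs : List Int) (xq : Int) (mod : Int), Dom_newton_eval_py xs coeffs xq mod → Pre_newton_eval_py xs coeffs xq mod → Spec_newton_eval_py xs coeffs xq mod (newton_eval_py xs coeffs xq mod)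

-- ===== LEMMAS AND PROOFS =====

-- A's backward Horner pass, structurally: nf (c::cs) (x::xs) = fmod (nf cs xs * fmod (xq-x) m + c) m
def pvNf (xq m : Int) : List Int → List Int → Int
  | [], _ => 0
  | [c], _ => c
  | c :: cs, x :: xs => Int.fmod (pvNf xq m cs xs * Int.fmod (xq - x) m + c) m
  | _ :: _ :: _, [] => 0

-- the exact tail value both computations are congruent to: g ((c,x)::ps) = (xq-x)*(c + g ps)
def pvG (xq : Int) : List (Int × Int) → Int
  | [] => 0
  | (c, x) :: ps => (xq - x) * (c + pvG xq ps)

-- the list B's first stage builds: prefix fmod-products of the reduced factors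
def pvScan (xq m : Int) : Int → List Int → List Int
  | _p, [] => []
  | p, x :: ys =>
    let q := Int.fmod (p * Int.fmod (xq - x) m) m
    q :: pvScan xq m q ys

theorem pv_fmod_emod (a m : Int) : (a.fmod m) % m = a % m := by
  have h := Int.fmod_add_mul_fdiv a m
  have : a.fmod m = a - m * a.fdiv m := by omega
  rw [this, Int.sub_mul_emod_self_left]

theorem pv_fmod_congr {a b m : Int} (h : a % m = b % m) : a.fmod m = b.fmod m := by
  have hd : m ∣ a - b := Int.ModEq.dvd (Int.ModEq.symm h)
  obtain ⟨k, hk⟩ := hd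
  have : a = b + m * k := by omega
  rw [this, Int.add_fmod, Int.mul_fmod_right, add_zero, Int.fmod_fmod]

theorem pv_fmod_modeq (a m : Int) : Int.ModEq m (a.fmod m) a := pv_fmod_emod a m

-- B's first stage (append-accumulate) builds exactly pvScan
theorem pvB_build (xq m : Int) : ∀ (ys : List Int) (acc : List Int) (p : Int),
    (List.foldl (fun (st : List Int × Int) x =>
        let q := Int.fmod (st.2 * Int.fmod (xq - x) m) m
        (st.1 ++ [q], q)) (acc, p) ys).1 = acc ++ pvScan xq m p ys := by
  intro ys
  induction ys with
  | nil => intro acc p; simp [pvScan]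
  | cons x ys ih =>
    intro acc p
    simp only [List.foldl_cons, pvScan]
    rw [ih]
    simp

-- B's second stage over the zipped (coefficient, prefix-product) list computes v + p * g mod m
theorem pvB_sum (xq m : Int) : ∀ (t ys : List Int) (v p : Int),
    Int.fmod (List.foldl (fun total (cq : Int × Int) => Int.fmod (total + cq.1 * cq.2) m) v
      (t.zip (pvScan xq m p ys))) m
    = Int.fmod (v + p * pvG xq (t.zip ys)) m := by
  intro t
  induction t with
  | nil => intro ys v p; apply pv_fmod_congr; simp [pvG]
  | cons c t ih =>
    intro ys v p
    cases ys with
    | nil =>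
      simp only [pvScan, List.zip_nil_right, List.foldl_nil, pvG]
      apply pv_fmod_congr; ring_nf
    | cons x ys =>
      simp only [pvScan, List.zip_cons_cons, List.foldl_cons, pvG]
      set q := Int.fmod (p * Int.fmod (xq - x) m) m with hq
      rw [ih]
      apply pv_fmod_congr
      have hqq : Int.ModEq m q (p * (xq - x)) := by
        calc q ≡ p * Int.fmod (xq - x) m [ZMOD m] := pv_fmod_modeq _ m
          _ ≡ p * (xq - x) [ZMOD m] := Int.ModEq.mul_left p (pv_fmod_modeq _ m)
      have hv : Int.ModEq m (Int.fmod (v + c * q) m) (v + c * (p * (xq - x))) := by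
        calc Int.fmod (v + c * q) m ≡ v + c * q [ZMOD m] := pv_fmod_modeq _ m
          _ ≡ v + c * (p * (xq - x)) [ZMOD m] := Int.ModEq.add_left v (Int.ModEq.mul_left c hqq)
      have hstep := Int.ModEq.add hv (Int.ModEq.mul hqq (Int.ModEq.refl (pvG xq (t.zip ys))))
      calc (Int.fmod (v + c * q) m + q * pvG xq (t.zip ys)) % m
          = (v + c * (p * (xq - x)) + p * (xq - x) * pvG xq (t.zip ys)) % m := hstep
        _ = (v + p * ((xq - x) * (c + pvG xq (t.zip ys)))) % m := by ring_nf

-- zipping against a long-enough take is zipping against the whole list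
theorem pv_zip_take (t : List Int) : ∀ (xs : List Int) (k : Nat), t.length ≤ k →
    t.zip (xs.take k) = t.zip xs := by
  induction t with
  | nil => intro xs k _; simp
  | cons c t ih =>
    intro xs k h
    cases xs with
    | nil => simp
    | cons x xs =>
      cases k with
      | zero => simp at h
      | succ k => simp only [List.take_succ_cons, List.zip_cons_cons]
                  rw [ih xs k (by simpa using h)]

theorem pvA_nf_g (xq m : Int) : ∀ (t : List Int) (xs : List Int) (c0 : Int),
    t.length ≤ xs.length →
    Int.fmod (pvNf xq m (c0 :: t) xs) m = Int.fmod (c0 + pvG xq (t.zip xs)) m := by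
  intro t
  induction t with
  | nil => intro xs c0 _; cases xs <;> simp [pvNf, pvG]
  | cons c1 t ih =>
    intro xs c0 h
    cases xs with
    | nil => simp at h
    | cons x xs =>
      simp only [pvNf, List.zip_cons_cons, pvG, Int.fmod_fmod]
      apply pv_fmod_congr
      have h1 : t.length ≤ xs.length := by simpa using h
      have hIH : Int.ModEq m (pvNf xq m (c1 :: t) xs) (c1 + pvG xq (t.zip xs)) := by
        have := ih xs c1 h1
        calc pvNf xq m (c1 :: t) xs ≡ Int.fmod (pvNf xq m (c1 :: t) xs) m [ZMOD m] := (pv_fmod_modeq _ m).symm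
          _ = Int.fmod (c1 + pvG xq (t.zip xs)) m := this
          _ ≡ c1 + pvG xq (t.zip xs) [ZMOD m] := pv_fmod_modeq _ m
      have hf : Int.ModEq m (Int.fmod (xq - x) m) (xq - x) := pv_fmod_modeq _ m
      have := Int.ModEq.add_right c0 (Int.ModEq.mul hIH hf)
      calc (pvNf xq m (c1 :: t) xs * Int.fmod (xq - x) m + c0) % m
          = ((c1 + pvG xq (t.zip xs)) * (xq - x) + c0) % m := this
        _ = (c0 + (xq - x) * (c1 + pvG xq (t.zip xs))) % m := by ring_nf

-- index-shift and edge-access helpers for A's indexed loop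
theorem pv_getD_shift (a : Int) (t : List Int) (k : Nat) :
    PySem.List.pyGetD (a :: t) ((k.succ : Nat) : Int) 0 = PySem.List.pyGetD t (k : Int) 0 := by
  rw [PySem.List.pyGetD_natCast, PySem.List.pyGetD_natCast]
  simp

theorem pv_getD_zero (a : Int) (t : List Int) :
    PySem.List.pyGetD (a :: t) ((0 : Nat) : Int) 0 = a := by
  rw [PySem.List.pyGetD_natCast]; simp

theorem pv_getD_neg_one (l : List Int) (hne : l ≠ []) :
    PySem.List.pyGetD l (-1) 0 = l.getLast hne := by
  cases l with
  | nil => exact absurd rfl hne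
  | cons a t =>
    simp only [PySem.List.pyGetD, PySem.List.pyGet?, PySem.List.pyIdx?]
    norm_num
    rw [List.getLast_eq_getElem]
    simp
    rfl

-- A's descending range is the reverse of the ascending Nat range
theorem pv_range_desc (c : Nat) :
    PySem.List.pyRange ((c : Int) - 2) (-1) (-1)
      = ((List.range (c - 1)).map (fun (k : Nat) => (k : Int))).reverse := by
  have h1 : PySem.List.pyRange ((c : Int) - 2) (-1) (-1)
      = (List.range (c - 1)).map (fun (k : Nat) => (c : Int) - 2 + -(k : Int)) := by
    simp only [PySem.List.pyRange]
    norm_num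
    have h2 : (if 2 < 1 + (c : Int) then ((c : Int) - 2 + 1).toNat else 0) = c - 1 := by
      split_ifs <;> omega
    rw [h2]
  rw [h1]
  apply List.ext_getElem
  · simp
  · intro i h1 h2
    simp only [List.getElem_map, List.getElem_range, List.getElem_reverse, List.length_map,
      List.length_range]
    have hi : i < c - 1 := by simpa using h2
    omega

-- A's indexed foldr equals the structural backward pass pvNf
theorem pvA_fold (xq m : Int) : ∀ (coeffs xs : List Int) (hne : coeffs ≠ []),
    coeffs.length ≤ xs.length + 1 →
    List.foldr (fun (k : Nat) val =>
        Int.fmod (val * Int.fmod (xq - PySem.List.pyGetD xs (k : Int) 0) m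
          + PySem.List.pyGetD coeffs (k : Int) 0) m)
      (coeffs.getLast hne) (List.range (coeffs.length - 1)) = pvNf xq m coeffs xs := by
  intro coeffs
  induction coeffs with
  | nil => intro xs hne; exact absurd rfl hne
  | cons c t ih =>
    intro xs hne hlen
    cases t with
    | nil => cases xs <;> simp [pvNf]
    | cons c' cs =>
      cases xs with
      | nil => simp at hlen
      | cons x xs' =>
        have hlen' : (c' :: cs).length ≤ xs'.length + 1 := by simpa using hlen
        have hne' : (c' :: cs) ≠ [] := by simp
        have hseed : (c :: c' :: cs).getLast hne = (c' :: cs).getLast hne' :=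
          List.getLast_cons hne'
        show List.foldr _ _ (List.range (cs.length + 1)) = _
        rw [List.range_succ_eq_map, List.foldr_cons, List.foldr_map]
        have hbody : (fun (k : Nat) (val : Int) =>
            Int.fmod (val * Int.fmod (xq - PySem.List.pyGetD (x :: xs') ((k.succ : Nat) : Int) 0) m
              + PySem.List.pyGetD (c :: c' :: cs) ((k.succ : Nat) : Int) 0) m)
            = (fun (k : Nat) (val : Int) =>
            Int.fmod (val * Int.fmod (xq - PySem.List.pyGetD xs' (k : Int) 0) m
              + PySem.List.pyGetD (c' :: cs) (k : Int) 0) m) := by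
          funext k val
          rw [pv_getD_shift, pv_getD_shift]
        have hih := ih xs' hne' hlen'
        simp only [List.length_cons, Nat.add_sub_cancel] at hih
        rw [hseed, hbody, hih]
        rw [pv_getD_zero, pv_getD_zero]
        rfl

-- ===== VERDICT (by name: the statement is the Claim_ definition above) =====
theorem newton_eval_py_spec : Claim_equal_newton_eval_py := by
  unfold Claim_equal_newton_eval_py
  intro xs coeffs xq m _ hpre
  unfold Spec_newton_eval_py
  cases coeffs with
  | nil => rfl
  | cons c0 t =>
    have hlen : t.length ≤ xs.length := by
      rcases hpre with h | ⟨_, h⟩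
      · simp at h
      · simpa using (by exact_mod_cast h : (c0 :: t).length ≤ xs.length + 1)
    have hne : (c0 :: t) ≠ [] := by simp
    -- A side
    have hA : newton_eval_py xs (c0 :: t) xq m = Int.fmod (pvNf xq m (c0 :: t) xs) m := by
      simp only [newton_eval_py, PySem.Int.mod]
      rw [if_neg (show ¬ (((c0 :: t).length : Int) = 0) from by exact_mod_cast (by simp : (c0 :: t).length ≠ 0))]
      rw [pv_range_desc (c0 :: t).length, List.foldl_reverse, List.foldr_map,
          pv_getD_neg_one _ hne, pvA_fold xq m (c0 :: t) xs hne (by simpa using hlen)]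
    -- B side
    have hB : newton_eval_py_alt xs (c0 :: t) xq m
        = Int.fmod (List.foldl (fun total (cq : Int × Int) => Int.fmod (total + cq.1 * cq.2) m) c0
            (t.zip (pvScan xq m 1 (xs.take t.length)))) m := by
      simp only [newton_eval_py_alt, PySem.Int.mod]
      rw [if_neg hne]
      have hbound : ((c0 :: t).length : Int) - 1 = ((t.length : Nat) : Int) := by
        simp
      rw [hbound, PySem.List.slice_to_natCast, PySem.List.slice_from_one]
      rw [pvB_build xq m (xs.take t.length) [] 1, List.nil_append]
      have hseed : PySem.List.pyGetD (c0 :: t) (0 : Int) 0 = c0 := by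
        rw [show (0 : Int) = ((0 : Nat) : Int) from rfl]
        exact pv_getD_zero c0 t
      rw [hseed]
      rfl
    rw [hA, hB, pvB_sum xq m t (xs.take t.length) c0 1,
        pv_zip_take t xs t.length le_rfl, pvA_nf_g xq m t xs c0 hlen]
    ring_nf
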